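-- pv_equiv track=rewrite | github.com/river-yu-51/CTPC-Problems-Solutions-Test-Cases | 2025/team/T11-Classroom-Lineup/solution.py | constructBreakpoints
-- ===== SOURCE A (Python) =====
-- def factorial(n):
-- 	if n == 1 or n == 0: return 1
-- 	else: return n * factorial(n - 1)
--
-- def countPermutations(individuals, pairs):
-- 	return factorial(individuals + pairs) * 2 ** pairs
--
-- def constructBreakpoints(arr):
-- 	bkps = [] # hold breakpoints
-- 	individuals = 0 # store number of individuals
-- 	pairs = 0 # store number of pairs
--
-- 	# Count individuals and pairs
-- 	for a in arr:
-- 		if len(a) == 2: pairs += 1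
-- 		else: individuals += 1
--
-- 	pairs //= 2 # since pairs are stored twice (once in each order, divide pairs by 2)
--
--     # Loop through array, if the next element is a pair then get the number of permutations without that pair. Otherwise, the next element must have been an individual, so get the number of permutations without that individual. This builds up an array that holds the difference in number of permutations between every two elements
-- 	for a in arr:
-- 		if len(a) == 2: bkps.append(countPermutations(individuals, pairs - 1))
-- 		else: bkps.append(countPermutations(individuals - 1, pairs))
--
--     # Create the sum left to right so instead of differences it stores totals
-- 	for i in range(1, len(arr)):
-- 		bkps[i] += bkps[i - 1]
--
-- 	return bkps # return breakpoints
-- ===== SOURCE B (Python) =====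
-- def constructBreakpoints(arr):
-- 	# Count length-2 entries once; precompute the shared factorial and the two
-- 	# possible per-element increments, then one prefix-sum pass.
-- 	n2 = sum(1 for a in arr if len(a) == 2)
-- 	pairs = n2 // 2
-- 	m = len(arr) - n2 + pairs - 1  # individuals + pairs - 1
-- 	f = 1
-- 	for k in range(2, m + 1):
-- 		f *= k
-- 	vi = f << pairs   # increment for an individual: factorial(individuals-1+pairs) * 2**pairs
-- 	vp = vi >> 1      # increment for a pair member: factorial(individuals+pairs-1) * 2**(pairs-1)
-- 	out = []
-- 	total = 0
-- 	for a in arr: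
-- 		total += vp if len(a) == 2 else vi
-- 		out.append(total)
-- 	return out
-- ===== Notes on version B (the rewrite author's own statement) =====
-- stated objective: faster
-- what changed: B counts length-2 entries once, computes the shared factorial iteratively a single time, derives the two possible per-element increments from it by shifts, and emits the answer in one prefix-sum pass, replacing A's per-element recursive factorial plus a separate summing pass.
-- outside the precondition, e.g. on constructBreakpoints(['a', 'bc']): A returns [1, 1.5], B returns [1, 1]; on constructBreakpoints(['ab']): A raises RecursionError, B returns [0]
import Mathlib
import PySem

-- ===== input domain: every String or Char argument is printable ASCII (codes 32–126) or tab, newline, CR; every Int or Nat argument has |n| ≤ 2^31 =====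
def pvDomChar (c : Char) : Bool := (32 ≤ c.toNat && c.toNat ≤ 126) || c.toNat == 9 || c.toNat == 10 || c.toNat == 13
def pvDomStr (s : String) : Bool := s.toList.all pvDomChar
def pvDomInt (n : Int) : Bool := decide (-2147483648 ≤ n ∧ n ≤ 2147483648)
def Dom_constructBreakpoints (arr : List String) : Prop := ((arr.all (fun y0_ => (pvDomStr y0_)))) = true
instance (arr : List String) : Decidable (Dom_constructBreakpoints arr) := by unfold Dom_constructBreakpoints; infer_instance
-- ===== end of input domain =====

-- B precomputes the shared factorial once and does a single prefix-sum pass (O(n) vs A's per-element recursive factorial); return value only.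


-- ===== PORT A =====
-- factorial(n), fueled: fuel n.toNat suffices for n ≥ 0 (n drops by 1 to the 0/1 base);
-- Python diverges for n < 0, which Pre_ excludes.
def pvFactRec (fuel : Nat) (n : Int) : Int :=
  match fuel with
  | 0 => 1
  | f + 1 => if n = 1 ∨ n = 0 then 1 else n * pvFactRec f (n - 1)

def pvFactorial (n : Int) : Int := pvFactRec n.toNat n

-- 2 ** pairs: exact for pairs ≥ 0 (Pre_ guarantees the pair branch only runs with pairs ≥ 1)
def pvCountPermutations (individuals pairs : Int) : Int :=
  pvFactorial (individuals + pairs) * 2 ^ pairs.toNat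

def constructBreakpoints (arr : List String) : List Int :=
  let cnt := arr.foldl
    (fun (st : Int × Int) a =>
      if PySem.Str.len a = 2 then (st.1, st.2 + 1) else (st.1 + 1, st.2)) (0, 0)
  let individuals := cnt.1
  let pairs := PySem.Int.floordiv cnt.2 2
  let bkps := arr.foldl
    (fun b a =>
      if PySem.Str.len a = 2 then b ++ [pvCountPermutations individuals (pairs - 1)]
      else b ++ [pvCountPermutations (individuals - 1) pairs]) ([] : List Int)
  (PySem.List.pyRange 1 (PySem.List.len arr) 1).foldl
    (fun b i => PySem.List.pySetD b i (PySem.List.pyGetD b i 0 + PySem.List.pyGetD b (i - 1) 0)) bkps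

-- ===== PORT B =====
def constructBreakpoints_alt (arr : List String) : List Int :=
  let n2 : Int := (arr.countP (fun a => decide (PySem.Str.len a = 2)) : Nat)
  let pairs := PySem.Int.floordiv n2 2
  let m := PySem.List.len arr - n2 + pairs - 1
  let f := (PySem.List.pyRange 2 (m + 1) 1).foldl (fun f k => f * k) 1
  let vi := f <<< pairs.toNat    -- f << pairs (pairs ≥ 0 always)
  let vp := vi >>> (1 : Nat)     -- vi >> 1
  (arr.foldl
    (fun (st : List Int × Int) a =>
      let total := st.2 + (if PySem.Str.len a = 2 then vp else vi)
      (st.1 ++ [total], total)) (([] : List Int), (0 : Int))).1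

-- ===== PRECONDITION & SPEC =====
-- Pre_ excludes arrays containing exactly one length-2 string: there A's pair branch computes
-- 2**(-1), a float (not an int), or calls factorial(-1), which raises RecursionError.
def Pre_constructBreakpoints (arr : List String) : Prop :=
  arr.countP (fun a => decide (PySem.Str.len a = 2)) ≠ 1
instance (arr : List String) : Decidable (Pre_constructBreakpoints arr) := by
  unfold Pre_constructBreakpoints; infer_instance

def pvWitness_constructBreakpoints : List String := ["ab", "cd", "e"]

def Spec_constructBreakpoints (arr : List String) (out : List Int) : Prop := out = constructBreakpoints_alt arr
instance (arr : List String) (out : List Int) : Decidable (Spec_constructBreakpoints arr out) := by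
  unfold Spec_constructBreakpoints; infer_instance

-- ===== CLAIM (what is proved, stated in full; the proofs are below) =====
def Claim_equal_constructBreakpoints : Prop := ∀ (arr : List String), Dom_constructBreakpoints arr → Pre_constructBreakpoints arr → Spec_constructBreakpoints arr (constructBreakpoints arr)

-- ===== LEMMAS AND PROOFS =====

-- prefix sums with running total t (the common shape of both results)
def pvPsum : List Int → Int → List Int
  | [], _ => []
  | x :: xs, t => (t + x) :: pvPsum xs (t + x)

theorem pvPsum_length (l : List Int) (t : Int) : (pvPsum l t).length = l.length := by
  induction l generalizing t with
  | nil => rfl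
  | cons x xs ih => simp [pvPsum, ih]

theorem pvPsum_append_singleton (l : List Int) (x t : Int) :
    pvPsum (l ++ [x]) t = pvPsum l t ++ [t + l.sum + x] := by
  induction l generalizing t with
  | nil => simp [pvPsum]
  | cons y ys ih =>
      simp only [List.cons_append, pvPsum, ih, List.sum_cons]
      have h : t + y + ys.sum + x = t + (y + ys.sum) + x := by ring
      rw [h]

theorem pvPsum_getD_last (l : List Int) (t : Int) (h : l ≠ []) :
    (pvPsum l t).getD (l.length - 1) 0 = t + l.sum := by
  induction l generalizing t with
  | nil => exact absurd rfl h
  | cons x xs ih =>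
      cases xs with
      | nil => simp [pvPsum]
      | cons y ys =>
          have h2 := ih (t := t + x) (List.cons_ne_nil _ _)
          show ((t + x) :: pvPsum (y :: ys) (t + x)).getD ((x :: y :: ys).length - 1) 0
              = t + (x :: y :: ys).sum
          have hl : (x :: y :: ys).length - 1 = ((y :: ys).length - 1) + 1 := by simp
          rw [hl, List.getD_cons_succ, h2]
          simp only [List.sum_cons]
          ring

-- A's counting loop
theorem pvCount_fold (arr : List String) (i p : Int) :
    arr.foldl (fun (st : Int × Int) a =>
        if PySem.Str.len a = 2 then (st.1, st.2 + 1) else (st.1 + 1, st.2)) (i, p)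
      = (i + (arr.countP (fun a => decide (¬ PySem.Str.len a = 2)) : Nat),
         p + (arr.countP (fun a => decide (PySem.Str.len a = 2)) : Nat)) := by
  induction arr generalizing i p with
  | nil => simp
  | cons a arr ih =>
      by_cases h : PySem.Str.len a = 2
      · have e1 : List.countP (fun x => decide (PySem.Str.len x = 2)) (a :: arr)
            = List.countP (fun x => decide (PySem.Str.len x = 2)) arr + 1 :=
          List.countP_cons_of_pos (decide_eq_true h)
        have e2 : List.countP (fun x => decide (¬ PySem.Str.len x = 2)) (a :: arr)
            = List.countP (fun x => decide (¬ PySem.Str.len x = 2)) arr :=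
          List.countP_cons_of_neg (fun hc => (of_decide_eq_true hc) h)
        rw [List.foldl_cons, if_pos h, ih, e1, e2]
        simp only [Prod.mk.injEq]
        constructor <;> push_cast <;> ring
      · have e1 : List.countP (fun x => decide (PySem.Str.len x = 2)) (a :: arr)
            = List.countP (fun x => decide (PySem.Str.len x = 2)) arr :=
          List.countP_cons_of_neg (fun hc => h (of_decide_eq_true hc))
        have e2 : List.countP (fun x => decide (¬ PySem.Str.len x = 2)) (a :: arr)
            = List.countP (fun x => decide (¬ PySem.Str.len x = 2)) arr + 1 :=
          List.countP_cons_of_pos (decide_eq_true h)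
        rw [List.foldl_cons, if_neg h, ih, e1, e2]
        simp only [Prod.mk.injEq]
        constructor <;> push_cast <;> ring

-- A's appending loop is a map
theorem pvBkps_fold (arr : List String) (acc : List Int) (v1 v2 : Int) :
    arr.foldl (fun b a => if PySem.Str.len a = 2 then b ++ [v1] else b ++ [v2]) acc
      = acc ++ arr.map (fun a => if PySem.Str.len a = 2 then v1 else v2) := by
  induction arr generalizing acc with
  | nil => simp
  | cons a arr ih =>
      by_cases h : PySem.Str.len a = 2
      · rw [List.foldl_cons, if_pos h, ih, List.map_cons, if_pos h]
        simp
      · rw [List.foldl_cons, if_neg h, ih, List.map_cons, if_neg h]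
        simp

-- A's in-place prefix-sum loop
theorem pvALoop (k : Nat) (l : List Int) (hk : k ≤ l.length) :
    (PySem.List.pyRange 1 (k : Int) 1).foldl
        (fun b i => PySem.List.pySetD b i (PySem.List.pyGetD b i 0 + PySem.List.pyGetD b (i - 1) 0)) l
      = pvPsum (l.take k) 0 ++ l.drop k := by
  induction k with
  | zero => simp [PySem.List.pyRange_one_eq_nil, pvPsum]
  | succ k ih =>
      rcases Nat.eq_zero_or_pos k with hk0 | hk1
      · subst hk0
        have hl : l ≠ [] := by intro h; subst h; simp at hk
        rcases l with _ | ⟨x, xs⟩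
        · simp at hk
        · simp [PySem.List.pyRange_one_eq_nil, pvPsum]
      · -- k ≥ 1
        have hkl : k < l.length := Nat.lt_of_lt_of_le (Nat.lt_succ_self k) hk
        have hsplit : PySem.List.pyRange 1 ((k : Int) + 1) 1
            = PySem.List.pyRange 1 (k : Int) 1 ++ [(k : Int)] :=
          PySem.List.pyRange_one_succ_right (by exact_mod_cast hk1)
        have hcast : ((k + 1 : Nat) : Int) = (k : Int) + 1 := by push_cast; ring
        rw [hcast, hsplit, List.foldl_append]
        rw [ih (Nat.le_of_lt hkl)]
        -- state after k steps
        set P := pvPsum (l.take k) 0 with hP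
        have hPlen : P.length = k := by
          rw [hP, pvPsum_length, List.length_take]; omega
        have hdrop : l.drop k = l[k] :: l.drop (k + 1) := List.drop_eq_getElem_cons hkl
        have htake : l.take (k + 1) = l.take k ++ [l[k]] := by
          rw [List.take_succ, List.getElem?_eq_getElem hkl]; rfl
        have hklast : (k : Int) - 1 = ((k - 1 : Nat) : Int) := by omega
        simp only [List.foldl_cons, List.foldl_nil]
        rw [hdrop]
        -- evaluate the two reads and the write
        have hget1 : PySem.List.pyGetD (P ++ l[k] :: l.drop (k + 1)) (k : Int) 0 = l[k] := by
          rw [PySem.List.pyGetD_natCast]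
          rw [List.getD_eq_getElem?_getD, List.getElem?_append_right (by omega)]
          simp [hPlen, List.getElem?_eq_getElem hkl]
        have hget2 : PySem.List.pyGetD (P ++ l[k] :: l.drop (k + 1)) ((k : Int) - 1) 0
            = 0 + (l.take k).sum := by
          have hlt : k - 1 < P.length := by omega
          rw [hklast, PySem.List.pyGetD_natCast, List.getD_eq_getElem?_getD,
            List.getElem?_append_left hlt]
          have hPne : l.take k ≠ [] := by
            intro hnil
            have h0 := congrArg List.length hnil
            rw [List.length_take] at h0
            simp only [List.length_nil] at h0
            omega
          have hlast := pvPsum_getD_last (l.take k) 0 hPne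
          rw [List.getD_eq_getElem?_getD] at hlast
          have hlen' : (l.take k).length - 1 = k - 1 := by
            rw [List.length_take]; omega
          rw [hlen', ← hP] at hlast
          exact hlast
        rw [hget1, hget2, PySem.List.pySetD_natCast]
        rw [List.set_append_right _ _ (by omega)]
        have : k - P.length = 0 := by omega
        rw [this, List.set_cons_zero]
        rw [htake, pvPsum_append_singleton, ← hP]
        simp; ring

-- B's output loop
theorem pvBLoop (arr : List String) (acc : List Int) (t vp vi : Int) :
    (arr.foldl
        (fun (st : List Int × Int) a =>
          (st.1 ++ [st.2 + (if PySem.Str.len a = 2 then vp else vi)],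
           st.2 + (if PySem.Str.len a = 2 then vp else vi))) (acc, t)).1
      = acc ++ pvPsum (arr.map (fun a => if PySem.Str.len a = 2 then vp else vi)) t := by
  induction arr generalizing acc t with
  | nil => simp [pvPsum]
  | cons a arr ih =>
      simp only [List.foldl_cons, List.map_cons, pvPsum]
      rw [ih]
      simp [List.append_assoc]

-- the recursive factorial equals the iterative range product, for natural arguments
theorem pvFact_eq (n : Nat) :
    pvFactorial (n : Int) = (PySem.List.pyRange 2 ((n : Int) + 1) 1).foldl (fun f k => f * k) 1 := by
  induction n with
  | zero => decide
  | succ n ih =>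
      rcases Nat.eq_zero_or_pos n with h0 | h1
      · subst h0; decide
      · have hstep : pvFactorial ((n + 1 : Nat) : Int)
            = ((n + 1 : Nat) : Int) * pvFactorial (n : Int) := by
          show pvFactRec ((n + 1 : Nat) : Int).toNat _ = _
          have ht : ((n + 1 : Nat) : Int).toNat = n + 1 := by omega
          rw [ht]
          show (if ((n + 1 : Nat) : Int) = 1 ∨ ((n + 1 : Nat) : Int) = 0 then 1
                else ((n + 1 : Nat) : Int) * pvFactRec n (((n + 1 : Nat) : Int) - 1)) = _
          rw [if_neg (by omega)]
          have harg : ((n + 1 : Nat) : Int) - 1 = (n : Int) := by omega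
          rw [harg]
          show _ = ((n + 1 : Nat) : Int) * pvFactRec (n : Int).toNat (n : Int)
          norm_num
        have hsplit : PySem.List.pyRange 2 (((n + 1 : Nat) : Int) + 1) 1
            = PySem.List.pyRange 2 ((n : Int) + 1) 1 ++ [(n : Int) + 1] := by
          have : ((n + 1 : Nat) : Int) + 1 = ((n : Int) + 1) + 1 := by push_cast; ring
          rw [this]
          exact PySem.List.pyRange_one_succ_right (by omega)
        rw [hstep, hsplit, List.foldl_append, ← ih]
        simp only [List.foldl_cons, List.foldl_nil]
        push_cast; ring

-- f ≥ 0 is not needed: shifts on exact multiples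
theorem pvShift_left (f : Int) (k : Nat) : f <<< k = f * 2 ^ k := by
  simpa [mul_comm] using Int.shiftLeft_eq f k

theorem pvShift_right_double (x : Int) : (x * 2) >>> (1 : Nat) = x := by
  rw [Int.shiftRight_eq_div_pow]; push_cast; omega

-- ===== VERDICT (by name: the statement is the Claim_ definition above) =====
theorem constructBreakpoints_spec : Claim_equal_constructBreakpoints := by
  intro arr _hdom hpre
  unfold Spec_constructBreakpoints constructBreakpoints constructBreakpoints_alt
  simp only [PySem.List.len_eq]
  set Pb : String → Bool := fun a => decide (PySem.Str.len a = 2) with hPb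
  set n2 : Nat := arr.countP Pb with hn2
  have hpre' : n2 ≠ 1 := hpre
  -- A's counters
  rw [pvCount_fold]
  dsimp only
  set nI : Nat := arr.countP (fun a => decide (¬ PySem.Str.len a = 2)) with hnI
  have hsum : n2 + nI = arr.length := by
    have hc : arr.countP (fun a => decide (¬ PySem.Str.len a = 2))
        = arr.countP (fun a => decide (¬ (Pb a) = true)) := by
      apply List.countP_congr
      intro a _
      simp [hPb]
    have hlen := List.length_eq_countP_add_countP (p := Pb) (l := arr)
    rw [hn2, hnI, hc]
    omega
  have hpairs : PySem.Int.floordiv (0 + (n2 : Int)) 2 = ((n2 / 2 : Nat) : Int) := by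
    rw [zero_add]
    exact_mod_cast PySem.Int.floordiv_natCast n2 2
  rw [hpairs]
  set p : Nat := n2 / 2 with hp
  -- B's quantities
  have hpairsB : PySem.Int.floordiv ((n2 : Nat) : Int) 2 = ((p : Nat) : Int) := by
    exact_mod_cast PySem.Int.floordiv_natCast n2 2
  rw [hpairsB]
  have hptoNat : ((p : Nat) : Int).toNat = p := by omega
  rw [hptoNat]
  set m : Int := (arr.length : Int) - (n2 : Int) + ((p : Nat) : Int) - 1 with hm
  set f : Int := (PySem.List.pyRange 2 (m + 1) 1).foldl (fun f k => f * k) 1 with hf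
  -- rewrite both sides to pvPsum of a map
  rw [pvBkps_fold, pvBLoop, List.nil_append, List.nil_append]
  have hlenmap : arr.length = (arr.map (fun a => if PySem.Str.len a = 2
      then pvCountPermutations (0 + (nI : Int)) (((p : Nat) : Int) - 1)
      else pvCountPermutations (0 + (nI : Int) - 1) ((p : Nat) : Int))).length := by simp
  rw [hlenmap, pvALoop _ _ (le_refl _)]
  rw [List.take_length, List.drop_length, List.append_nil]
  congr 1
  apply List.map_congr_left
  intro a ha
  by_cases h2 : PySem.Str.len a = 2
  · -- pair branch: reachable only when n2 ≥ 2 (Pre_ rules out n2 = 1)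
    have hmem : 0 < n2 := by
      rw [hn2]
      exact List.countP_pos_iff.mpr ⟨a, ha, decide_eq_true h2⟩
    have hn2ge : 2 ≤ n2 := by omega
    have hpge : 1 ≤ p := by rw [hp]; omega
    have hfact : pvCountPermutations (0 + (nI : Int)) (((p : Nat) : Int) - 1)
        = f * 2 ^ (p - 1) := by
      unfold pvCountPermutations
      have harg : 0 + (nI : Int) + (((p : Nat) : Int) - 1) = ((nI + p - 1 : Nat) : Int) := by
        push_cast; omega
      rw [harg, pvFact_eq]
      have hm' : m + 1 = ((nI + p - 1 : Nat) : Int) + 1 := by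
        rw [hm]; push_cast; omega
      have hexp : ((((p : Nat) : Int)) - 1).toNat = p - 1 := by omega
      rw [← hm', ← hf, hexp]
    rw [if_pos h2, if_pos h2, hfact]
    rw [pvShift_left]
    have h2p : (2 : Int) ^ p = 2 ^ (p - 1) * 2 := by
      have hp1 : p = (p - 1) + 1 := by omega
      conv_lhs => rw [hp1]
      rw [pow_succ]
    rw [h2p, ← mul_assoc, pvShift_right_double]
  · -- individual branch: reachable only when nI ≥ 1
    have hmem : 0 < nI := by
      rw [hnI]
      exact List.countP_pos_iff.mpr ⟨a, ha, decide_eq_true h2⟩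
    rw [if_neg h2, if_neg h2]
    unfold pvCountPermutations
    have harg : 0 + (nI : Int) - 1 + ((p : Nat) : Int) = ((nI - 1 + p : Nat) : Int) := by
      push_cast; omega
    rw [harg, pvFact_eq]
    have hm' : m + 1 = ((nI - 1 + p : Nat) : Int) + 1 := by
      rw [hm]; push_cast; omega
    rw [← hm', ← hf, pvShift_left, hptoNat]
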